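-- pv_equiv track=rewrite | github.com/barteksielicki/advent-of-code | 2020/d06.py | read_groups_for_b
-- ===== SOURCE A (Python) =====
-- def read_groups_for_b(input_lines):
--     groups = []
--     current_group = None
--     for line in input_lines:
--         if not line:
--             groups.append(current_group)
--             current_group = None
--             continue
--         if current_group is None:
--             current_group = set(line)
--         else:
--             current_group = current_group & set(line)
--     groups.append(current_group)
--     return groups
-- ===== SOURCE B (Python) =====
-- def read_groups_for_b(input_lines):
--     # parse first: split into blank-line-separated segments
--     segments = []
--     seg = []
--     for line in input_lines:
--         if line:
--             seg.append(line)
--         else: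
--             segments.append(seg)
--             seg = []
--     segments.append(seg)
--     # then fold each segment into an intersection (None for an empty segment)
--     return [intersect_all(seg) for seg in segments]
--
-- def intersect_all(seg):
--     if not seg:
--         return None
--     result = set(seg[0])
--     for line in seg[1:]:
--         result = result & set(line)
--     return result
-- ===== Notes on version B (the rewrite author's own statement) =====
-- stated objective: alternative
-- what changed: B splits the input into blank-line-separated segments first and then maps an intersection-fold over the segments, instead of A's single loop that interleaves parsing with maintaining a running intersection and a None sentinel.
import Mathlib
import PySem

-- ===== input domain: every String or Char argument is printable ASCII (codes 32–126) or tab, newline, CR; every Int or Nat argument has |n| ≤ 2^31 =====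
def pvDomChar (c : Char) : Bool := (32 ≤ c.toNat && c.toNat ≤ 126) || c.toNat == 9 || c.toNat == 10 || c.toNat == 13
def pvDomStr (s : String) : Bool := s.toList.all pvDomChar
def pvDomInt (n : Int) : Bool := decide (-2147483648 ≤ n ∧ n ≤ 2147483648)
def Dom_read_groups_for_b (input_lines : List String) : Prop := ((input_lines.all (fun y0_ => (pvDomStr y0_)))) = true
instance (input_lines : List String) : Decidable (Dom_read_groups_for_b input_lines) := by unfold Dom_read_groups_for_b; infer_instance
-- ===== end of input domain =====

-- B parses the input into blank-line-separated segments first, then maps an intersection-fold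
-- over the segments, instead of A's single loop interleaving parsing with a running intersection.

-- ===== PORT A =====
-- set(line): the set of the 1-char strings of line, in first-occurrence order
def pvLineSet (line : String) : PySem.Set String :=
  PySem.Set.ofList (line.toList.map (fun c => String.ofList [c]))

-- the for-loop of A: state = (groups, current_group); final append after the loop
def readGroupsLoopA : List String → List (Option (List String)) → Option (List String) → List (Option (List String))
  | [], groups, cur => groups ++ [cur]
  | line :: rest, groups, cur =>
    if line = "" then
      readGroupsLoopA rest (groups ++ [cur]) none
    else
      match cur with
      | none => readGroupsLoopA rest groups (some (pvLineSet line))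
      | some s => readGroupsLoopA rest groups (some (PySem.Set.inter s (pvLineSet line)))

def read_groups_for_b (input_lines : List String) : List (Option (List String)) :=
  readGroupsLoopA input_lines [] none

-- ===== PORT B =====
-- Source B's parsing loop: state = (segments, seg); final append of seg after the loop
def segmentsB : List String → List (List String) → List String → List (List String)
  | [], segments, seg => segments ++ [seg]
  | line :: rest, segments, seg =>
    if line = "" then segmentsB rest (segments ++ [seg]) []
    else segmentsB rest segments (seg ++ [line])

-- Source B's intersect_all
def intersectAll : List String → Option (List String)
  | [] => none
  | l :: rest => some (rest.foldl (fun s line => PySem.Set.inter s (pvLineSet line)) (pvLineSet l))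

def read_groups_for_b_alt (input_lines : List String) : List (Option (List String)) :=
  (segmentsB input_lines [] []).map intersectAll

-- ===== PRECONDITION & SPEC =====
def Spec_read_groups_for_b (input_lines : List String) (out : List (Option (List String))) : Prop := out = read_groups_for_b_alt input_lines
instance (input_lines : List String) (out : List (Option (List String))) : Decidable (Spec_read_groups_for_b input_lines out) := by unfold Spec_read_groups_for_b; infer_instance

-- ===== CLAIM (what is proved, stated in full; the proofs are below) =====
def Claim_equal_read_groups_for_b : Prop := ∀ (input_lines : List String), Dom_read_groups_for_b input_lines → Spec_read_groups_for_b input_lines (read_groups_for_b input_lines)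

-- ===== LEMMAS AND PROOFS =====

-- ===== VERDICT (by name: the statement is the Claim_ definition above) =====
lemma intersectAll_append (seg : List String) (line : String) :
    intersectAll (seg ++ [line]) =
      match intersectAll seg with
      | none => some (pvLineSet line)
      | some s => some (PySem.Set.inter s (pvLineSet line)) := by
  cases seg with
  | nil => simp [intersectAll]
  | cons l rest => simp [intersectAll, List.foldl_append]

lemma segB_acc (rest : List String) :
    ∀ (acc : List (List String)) (seg : List String),
      segmentsB rest acc seg = acc ++ segmentsB rest [] seg := by
  induction rest with
  | nil => intro acc seg; simp [segmentsB]
  | cons line rest ih =>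
    intro acc seg
    simp only [segmentsB]
    split
    · rw [ih (acc ++ [seg])]; simp only [List.nil_append]; rw [ih [seg]]; simp
    · exact ih acc (seg ++ [line])

lemma loopA_eq_segments (rest : List String) :
    ∀ (groups : List (Option (List String))) (seg : List String),
      readGroupsLoopA rest groups (intersectAll seg) =
        groups ++ (segmentsB rest [] seg).map intersectAll := by
  induction rest with
  | nil => intro groups seg; simp [readGroupsLoopA, segmentsB]
  | cons line rest ih =>
    intro groups seg
    by_cases h : line = ""
    · have h1 : readGroupsLoopA (line :: rest) groups (intersectAll seg) =
          readGroupsLoopA rest (groups ++ [intersectAll seg]) (intersectAll []) := by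
        simp [readGroupsLoopA, h, intersectAll]
      have h2 : segmentsB (line :: rest) [] seg = seg :: segmentsB rest [] [] := by
        simp only [segmentsB, if_pos h]
        rw [segB_acc]; simp
      rw [h1, ih, h2]; simp
    · have h2 : segmentsB (line :: rest) [] seg = segmentsB rest [] (seg ++ [line]) := by
        simp [segmentsB, h]
      rw [h2, ← ih groups (seg ++ [line])]
      rw [intersectAll_append]
      cases hseg : intersectAll seg with
      | none => simp [readGroupsLoopA, h]
      | some s => simp [readGroupsLoopA, h]

theorem read_groups_for_b_spec : Claim_equal_read_groups_for_b := by
  intro input_lines _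
  show read_groups_for_b input_lines = read_groups_for_b_alt input_lines
  have := loopA_eq_segments input_lines [] []
  simpa [read_groups_for_b, read_groups_for_b_alt, intersectAll] using this
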